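-- pv_equiv track=rewrite | github.com/lynnswap/WKInternalsNotes | Scripts/generate_webkit_uiprocess_objc_symbol_graph.py | _split_swift_signature
-- ===== SOURCE A (Python) =====
-- def _split_swift_signature(text: str) -> str:
--     depth = 0
--     in_string = False
--     escape = False
--     for i, ch in enumerate(text):
--         if in_string:
--             if escape:
--                 escape = False
--                 continue
--             if ch == "\\":
--                 escape = True
--                 continue
--             if ch == "\"":
--                 in_string = False
--             continue
--         if ch == "\"":
--             in_string = True
--             continue
--         if depth == 0 and ch in "{=":
--             return text[:i].strip()
--         if ch in "([{":
--             depth += 1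
--             continue
--         if ch in ")]}":
--             depth = max(0, depth - 1)
--             continue
--     return text.strip()
-- ===== SOURCE B (Python) =====
-- def _mask_strings(text):
--     # Pass 1: replace every string literal (quotes, body, escapes) by spaces,
--     # keeping indices aligned with the original text.
--     out = []
--     i = 0
--     n = len(text)
--     while i < n:
--         if text[i] == '"':
--             out.append(' ')
--             i += 1
--             while i < n and text[i] != '"':
--                 if text[i] == '\\' and i + 1 < n:
--                     out.append(' ')
--                     out.append(' ')
--                     i += 2
--                 else:
--                     out.append(' ')
--                     i += 1
--             if i < n:
--                 out.append(' ')
--                 i += 1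
--         else:
--             out.append(text[i])
--             i += 1
--     return out
--
--
-- def _prefix_depths(mask):
--     # Pass 2: bracket depth before each character (clamped at 0).
--     depths = []
--     d = 0
--     for ch in mask:
--         depths.append(d)
--         if ch in "([{":
--             d += 1
--         elif ch in ")]}":
--             d = max(0, d - 1)
--     return depths
--
--
-- def _split_swift_signature(text: str) -> str:
--     mask = _mask_strings(text)
--     depths = _prefix_depths(mask)
--     # Pass 3: first top-level delimiter.
--     for i, (ch, d) in enumerate(zip(mask, depths)):
--         if d == 0 and ch in "{=":
--             return text[:i].strip()
--     return text.strip()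
-- ===== Notes on version B (the rewrite author's own statement) =====
-- stated objective: alternative
-- what changed: Replaces A's single-pass state machine (depth/in_string/escape flags) by a staged three-pass pipeline: first mask out string literals into an index-aligned list, then compute the clamped prefix-depth before every character, then search the masked/depth pairs for the first top-level delimiter.
import Mathlib
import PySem

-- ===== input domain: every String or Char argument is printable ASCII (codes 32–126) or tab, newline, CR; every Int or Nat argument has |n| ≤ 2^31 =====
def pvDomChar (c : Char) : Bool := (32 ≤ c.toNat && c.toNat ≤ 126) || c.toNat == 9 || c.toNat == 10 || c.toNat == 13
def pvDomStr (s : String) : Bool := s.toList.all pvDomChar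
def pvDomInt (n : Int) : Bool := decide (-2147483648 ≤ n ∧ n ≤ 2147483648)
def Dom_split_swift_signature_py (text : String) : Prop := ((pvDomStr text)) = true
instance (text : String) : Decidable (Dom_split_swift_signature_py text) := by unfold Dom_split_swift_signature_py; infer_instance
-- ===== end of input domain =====

-- B replaces A's single-pass flag state machine by a staged pipeline (mask string
-- literals, prefix depths, search); alternative decomposition, same cost.

-- ===== PORT A =====
-- A's for-loop over enumerate(text) with state (depth, in_string, escape).
def splitSigGoA (text : String) : List Char → Nat → Int → Bool → Bool → String
  | [], _, _, _, _ => PySem.Str.strip text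
  | c :: r, i, depth, inStr, esc =>
    if inStr then
      if esc then splitSigGoA text r (i+1) depth inStr false
      else if c = '\\' then splitSigGoA text r (i+1) depth inStr true
      else if c = '"' then splitSigGoA text r (i+1) depth false esc
      else splitSigGoA text r (i+1) depth inStr esc
    else if c = '"' then splitSigGoA text r (i+1) depth true esc
    else if depth = 0 ∧ (c = '{' ∨ c = '=') then
      PySem.Str.strip (PySem.Str.slice text none (some (i : Int)))
    else if c = '(' ∨ c = '[' ∨ c = '{' then splitSigGoA text r (i+1) (depth+1) inStr esc
    else if c = ')' ∨ c = ']' ∨ c = '}' then splitSigGoA text r (i+1) (max 0 (depth-1)) inStr esc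
    else splitSigGoA text r (i+1) depth inStr esc

def split_swift_signature_py (text : String) : String :=
  splitSigGoA text text.toList 0 0 false false

-- ===== PORT B =====
-- Pass 1: B's _mask_strings — outer while over the text, inner while consuming a
-- string literal; every consumed literal character becomes ' '.
mutual
def maskB : List Char → List Char
  | [] => []
  | c :: r => if c = '"' then ' ' :: maskStrB r else c :: maskB r
def maskStrB : List Char → List Char
  | [] => []
  | c :: r =>
    if c = '"' then ' ' :: maskB r
    else if c = '\\' then
      match r with
      | [] => [' ']                             -- backslash is the last char: i+1 < n fails
      | _ :: r2 => ' ' :: ' ' :: maskStrB r2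
    else ' ' :: maskStrB r
end

-- Pass 2: B's _prefix_depths — clamped bracket depth before each character.
def depthsB : List Char → Int → List Int
  | [], _ => []
  | c :: r, d =>
    d :: depthsB r (if c = '(' ∨ c = '[' ∨ c = '{' then d + 1
                    else if c = ')' ∨ c = ']' ∨ c = '}' then max 0 (d - 1) else d)

-- Pass 3: B's enumerate(zip(mask, depths)) search for the first top-level delimiter.
def findCutB (text : String) : List (Char × Int) → Nat → String
  | [], _ => PySem.Str.strip text
  | (c, d) :: r, i =>
    if d = 0 ∧ (c = '{' ∨ c = '=') then
      PySem.Str.strip (PySem.Str.slice text none (some (i : Int)))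
    else findCutB text r (i+1)

def split_swift_signature_py_alt (text : String) : String :=
  findCutB text ((maskB text.toList).zip (depthsB (maskB text.toList) 0)) 0

-- ===== PRECONDITION & SPEC =====
def Spec_split_swift_signature_py (text : String) (out : String) : Prop := out = split_swift_signature_py_alt text
instance (text : String) (out : String) : Decidable (Spec_split_swift_signature_py text out) := by unfold Spec_split_swift_signature_py; infer_instance

-- ===== CLAIM (what is proved, stated in full; the proofs are below) =====
def Claim_equal_split_swift_signature_py : Prop := ∀ (text : String), Dom_split_swift_signature_py text → Spec_split_swift_signature_py text (split_swift_signature_py text)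

-- ===== LEMMAS AND PROOFS =====

-- unfolding lemmas for the mutual mask functions
theorem mb_q (r : List Char) : maskB ('"' :: r) = ' ' :: maskStrB r := by
  rw [maskB.eq_def]; simp
theorem mb_other (c : Char) (r : List Char) (h1 : ¬ c = '"') : maskB (c :: r) = c :: maskB r := by
  rw [maskB.eq_def]; simp [h1]
theorem ms_q (r : List Char) : maskStrB ('"' :: r) = ' ' :: maskB r := by
  rw [maskStrB.eq_def]; simp
theorem ms_bs_nil : maskStrB ['\\'] = [' '] := by rw [maskStrB.eq_def]; simp
theorem ms_bs (c2 : Char) (r2 : List Char) : maskStrB ('\\' :: c2 :: r2) = ' ' :: ' ' :: maskStrB r2 := by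
  rw [maskStrB.eq_def]; simp
theorem ms_other (c : Char) (r : List Char) (h1 : ¬ c = '"') (h2 : ¬ c = '\\') :
    maskStrB (c :: r) = ' ' :: maskStrB r := by
  rw [maskStrB.eq_def]; simp [h1, h2]

-- a masked space is neutral in passes 2 and 3
theorem space_step (text : String) (m : List Char) (i : Nat) (d : Int) :
    findCutB text ((' ' :: m).zip (depthsB (' ' :: m) d)) i
      = findCutB text (m.zip (depthsB m d)) (i + 1) := by
  simp [depthsB, findCutB]

theorem splitSig_main : ∀ (n : Nat) (r : List Char), r.length ≤ n → ∀ (text : String) (i : Nat) (d : Int),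
    splitSigGoA text r i d false false
      = findCutB text ((maskB r).zip (depthsB (maskB r) d)) i ∧
    splitSigGoA text r i d true false
      = findCutB text ((maskStrB r).zip (depthsB (maskStrB r) d)) i := by
  intro n
  induction n using Nat.strong_induction_on with
  | _ n IH =>
    intro r hr text i d
    match r with
    | [] => simp [splitSigGoA, maskB, maskStrB, depthsB, findCutB]
    | c :: r =>
      simp only [List.length_cons] at hr
      constructor
      · -- normal mode
        by_cases hq : c = '"'
        · subst hq
          simp only [splitSigGoA, mb_q, space_step]
          norm_num
          exact (IH r.length (by omega) r (le_refl _) text (i+1) d).2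
        · simp only [splitSigGoA, mb_other c r hq, Bool.false_eq_true, if_false,
            depthsB, List.zip_cons_cons, findCutB, if_neg hq]
          by_cases hb : d = 0 ∧ (c = '{' ∨ c = '=')
          · simp [hb]
          · simp only [if_neg hb]
            have IH1 := fun i d => (IH r.length (by omega) r (le_refl _) text i d).1
            by_cases ho : c = '(' ∨ c = '[' ∨ c = '{'
            · simp [ho, IH1]
            · by_cases hc : c = ')' ∨ c = ']' ∨ c = '}'
              · simp [ho, hc, IH1]
              · simp [ho, hc, IH1]
      · -- in-string mode: A's flag walk equals B's masked spaces
        by_cases hbs : c = '\\'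
        · subst hbs
          match r with
          | [] =>
            simp [splitSigGoA, ms_bs_nil, depthsB, findCutB]
          | c2 :: r2 =>
            simp only [splitSigGoA, ms_bs, space_step]
            norm_num
            have := (IH r2.length (by simp at hr; omega) r2 (le_refl _) text (i+2) d).2
            simpa [add_assoc] using this
        · by_cases hq : c = '"'
          · subst hq
            simp only [splitSigGoA, ms_q, space_step]
            norm_num
            exact (IH r.length (by omega) r (le_refl _) text (i+1) d).1
          · simp only [splitSigGoA, ms_other c r hq hbs, space_step, if_neg hbs, if_neg hq]
            norm_num
            exact (IH r.length (by omega) r (le_refl _) text (i+1) d).2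

-- ===== VERDICT (by name: the statement is the Claim_ definition above) =====
theorem split_swift_signature_py_spec : Claim_equal_split_swift_signature_py := by
  intro text _
  unfold Spec_split_swift_signature_py split_swift_signature_py split_swift_signature_py_alt
  exact (splitSig_main text.toList.length text.toList (le_refl _) text 0 0).1
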